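-- pv_equiv track=rewrite | github.com/billyxs/notes.md | python/learning/python_morsels/2019-05-06_window/window.py | window_4
-- ===== SOURCE A (Python) =====
-- def window_4(iterable, n):
--     """Returns a list of tuples of items in given list and next n-1 items."""
--     items = []
--     current = ()
--     for item in iterable:
--         if len(current) < n:
--             current = (*current, item,)
--         else:
--             current = (*current[1:], item)
--         if len(current) == n:
--             items.append(current)
--     return items
-- ===== SOURCE B (Python) =====
-- def window_4(iterable, n):
--     """Returns a list of tuples of items in given list and next n-1 items."""
--     items = list(iterable)
--     if n > len(items):
--         return []
--     return list(zip(*(items[i:] for i in range(n))))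
-- ===== Notes on version B (the rewrite author's own statement) =====
-- stated objective: idiomatic
-- what changed: B builds the windows by zipping n progressively offset slices of the materialized list (zip-transpose) instead of maintaining a sliding tuple and appending inside a loop.
import Mathlib
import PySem

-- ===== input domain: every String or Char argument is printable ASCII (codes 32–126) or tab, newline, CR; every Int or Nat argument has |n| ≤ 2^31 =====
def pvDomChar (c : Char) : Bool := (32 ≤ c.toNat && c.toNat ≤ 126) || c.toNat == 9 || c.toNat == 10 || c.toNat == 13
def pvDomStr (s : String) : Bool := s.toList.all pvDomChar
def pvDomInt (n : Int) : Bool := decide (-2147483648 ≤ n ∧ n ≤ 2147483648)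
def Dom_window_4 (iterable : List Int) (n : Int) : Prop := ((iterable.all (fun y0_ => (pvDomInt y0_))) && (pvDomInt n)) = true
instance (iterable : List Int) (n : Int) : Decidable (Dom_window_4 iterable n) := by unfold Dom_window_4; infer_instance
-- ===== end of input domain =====

-- B rebuilds the windows by zipping n progressively offset slices (zip-transpose) instead of
-- A's incremental sliding tuple; objective: idiomatic, same asymptotic cost.

-- ===== PORT A =====
-- loop body of A's for-loop, as a named step function
def pvStepA (n : Int) (st : List (List Int) × List Int) (item : Int) : List (List Int) × List Int :=
  let current := if (st.2.length : Int) < n then st.2 ++ [item] else st.2.drop 1 ++ [item]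
  let items := if (current.length : Int) = n then st.1 ++ [current] else st.1
  (items, current)

def window_4 (iterable : List Int) (n : Int) : List (List Int) :=
  (iterable.foldl (pvStepA n) ([], [])).1

-- ===== PORT B =====
-- zip(*lists): uncons every list (none if any is exhausted)
def pvUncons : List (List Int) → Option (List Int × List (List Int))
  | [] => some ([], [])
  | [] :: _ => none
  | (a :: t) :: rest => (pvUncons rest).map (fun p => (a :: p.1, t :: p.2))

def pvZipAux : List Int → List (List Int) → List (List Int)
  | [], _ => []
  | a :: l, ls =>
    match pvUncons ls with
    | none => []
    | some (hs, ts) => (a :: hs) :: pvZipAux l ts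

-- zip with no iterables yields nothing
def pvZip : List (List Int) → List (List Int)
  | [] => []
  | l :: ls => pvZipAux l ls

def window_4_alt (iterable : List Int) (n : Int) : List (List Int) :=
  let items := iterable
  if n > (items.length : Int) then []
  else pvZip ((PySem.List.pyRange 0 n 1).map (fun i => PySem.List.slice items (some i) none))

-- ===== PRECONDITION & SPEC =====
def Spec_window_4 (iterable : List Int) (n : Int) (out : List (List Int)) : Prop := out = window_4_alt iterable n
instance (iterable : List Int) (n : Int) (out : List (List Int)) : Decidable (Spec_window_4 iterable n out) := by unfold Spec_window_4; infer_instance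

-- ===== CLAIM (what is proved, stated in full; the proofs are below) =====
def Claim_equal_window_4 : Prop := ∀ (iterable : List Int) (n : Int), Dom_window_4 iterable n → Spec_window_4 iterable n (window_4 iterable n)

-- ===== LEMMAS AND PROOFS =====

-- common specification: the list of length-N windows
def pvW (N : Nat) : List Int → List (List Int)
  | [] => []
  | x :: xs => if xs.length + 1 < N then [] else ((x :: xs).take N) :: pvW N xs

theorem pvW_short (N : Nat) (xs : List Int) (h : xs.length < N) : pvW N xs = [] := by
  cases xs with
  | nil => rfl
  | cons x t => simp only [pvW]; rw [if_pos]; simpa using h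

theorem pvW_full (N : Nat) (cur ys : List Int) (h : cur.length = N) (hN : 1 ≤ N) :
    pvW N (cur ++ ys) = cur :: pvW N (cur.tail ++ ys) := by
  cases cur with
  | nil => simp at h; omega
  | cons c cs =>
    simp only [List.cons_append, pvW, List.tail_cons]
    rw [if_neg (by simp at h ⊢; omega)]
    congr 1
    have hcs : cs.length = N - 1 := by simp at h; omega
    cases N with
    | zero => omega
    | succ m =>
      simp only [List.take_succ_cons]
      congr 1
      have : m = cs.length := by omega
      subst this
      exact List.take_left

-- A's loop after the current window is full
theorem pvA_slide (N : Nat) (hN : 1 ≤ N) (ys : List Int) :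
    ∀ (items : List (List Int)) (cur : List Int), cur.length = N →
      (ys.foldl (pvStepA (N : Int)) (items, cur)).1 = items ++ (pvW N (cur ++ ys)).tail := by
  induction ys with
  | nil =>
    intro items cur h
    cases cur with
    | nil => simp at h; omega
    | cons c cs =>
      simp only [List.foldl_nil, List.append_nil, pvW]
      rw [if_neg (by simp at h ⊢; omega)]
      simp [pvW_short N cs (by simp at h ⊢; omega)]
  | cons y ys ih =>
    intro items cur h
    have hne : ¬ ((cur.length : Int) < (N : Int)) := by exact_mod_cast by omega
    have hlen : (cur.drop 1 ++ [y]).length = N := by simp; omega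
    have e1 : pvStepA (N : Int) (items, cur) y = (items ++ [cur.drop 1 ++ [y]], cur.drop 1 ++ [y]) := by
      simp only [pvStepA]
      rw [if_neg hne, if_pos (by exact_mod_cast hlen)]
    rw [List.foldl_cons, e1]
    rw [ih (items ++ [cur.drop 1 ++ [y]]) (cur.drop 1 ++ [y]) hlen]
    rw [pvW_full N cur (y :: ys) h hN]
    cases cur with
    | nil => simp at h; omega
    | cons c cs =>
      have hlen' : (cs ++ [y]).length = N := by simp at h ⊢; omega
      have hx : cs ++ y :: ys = (cs ++ [y]) ++ ys := by simp
      simp only [List.drop_one, List.tail_cons] at *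
      rw [hx, pvW_full N (cs ++ [y]) ys hlen' hN]
      simp

-- A's loop while the current window is still filling
theorem pvA_fill (N : Nat) (hN : 1 ≤ N) (ys : List Int) :
    ∀ (items : List (List Int)) (cur : List Int), cur.length < N →
      (ys.foldl (pvStepA (N : Int)) (items, cur)).1 = items ++ pvW N (cur ++ ys) := by
  induction ys with
  | nil =>
    intro items cur h
    simp [pvW_short N cur h]
  | cons y ys ih =>
    intro items cur h
    have hlt : ((cur.length : Int) < (N : Int)) := by exact_mod_cast h
    by_cases hfull : (cur ++ [y]).length = N
    · have e1 : pvStepA (N : Int) (items, cur) y = (items ++ [cur ++ [y]], cur ++ [y]) := by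
        simp only [pvStepA]
        rw [if_pos hlt, if_pos (by exact_mod_cast hfull)]
      rw [List.foldl_cons, e1]
      rw [pvA_slide N hN ys (items ++ [cur ++ [y]]) (cur ++ [y]) hfull]
      have : cur ++ y :: ys = (cur ++ [y]) ++ ys := by simp
      rw [this, pvW_full N (cur ++ [y]) ys hfull hN]
      simp
    · have e1 : pvStepA (N : Int) (items, cur) y = (items, cur ++ [y]) := by
        simp only [pvStepA]
        rw [if_pos hlt, if_neg (by exact_mod_cast hfull)]
      rw [List.foldl_cons, e1]
      rw [ih items (cur ++ [y]) (by simp at hfull ⊢; omega)]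
      simp

-- A's loop when n ≤ 0 never records a window
theorem pvA_nonpos (n : Int) (hn : n ≤ 0) (ys : List Int) :
    ∀ (items : List (List Int)) (cur : List Int),
      (ys.foldl (pvStepA n) (items, cur)).1 = items := by
  induction ys with
  | nil => intro items cur; rfl
  | cons y ys ih =>
    intro items cur
    have h1 : ¬ ((cur.length : Int) < n) := by
      have : (0 : Int) ≤ (cur.length : Int) := by positivity
      omega
    have h2 : ¬ (((cur.drop 1 ++ [y]).length : Int) = n) := by simp; omega
    have e1 : pvStepA n (items, cur) y = (items, cur.drop 1 ++ [y]) := by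
      simp only [pvStepA]
      rw [if_neg h1, if_neg h2]
    rw [List.foldl_cons, e1]
    exact ih items _

theorem pvUncons_all (ls : List (List Int)) (h : ∀ l ∈ ls, l ≠ []) :
    pvUncons ls = some (ls.map (fun l => l.headD 0), ls.map List.tail) := by
  induction ls with
  | nil => rfl
  | cons l ls ih =>
    cases l with
    | nil => exact absurd rfl (h [] (by simp))
    | cons a t =>
      simp only [pvUncons, ih (fun l hl => h l (by simp [hl]))]
      simp

theorem pvUncons_none (ls : List (List Int)) (h : [] ∈ ls) : pvUncons ls = none := by
  induction ls with
  | nil => simp at h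
  | cons l ls ih =>
    cases l with
    | nil => rfl
    | cons a t =>
      simp only [pvUncons, ih (by simpa using h)]
      rfl

theorem pv_heads_take (N : Nat) : ∀ (t : List Int), N ≤ t.length →
    (List.range N).map (fun i => (t.drop i).headD 0) = t.take N := by
  induction N with
  | zero => intro t _; simp
  | succ m ih =>
    intro t h
    cases t with
    | nil => simp at h
    | cons y ys =>
      rw [List.range_succ_eq_map]
      simp only [List.map_cons, List.map_map, List.drop_zero, List.headD_cons, List.take_succ_cons]
      congr 1
      rw [← ih ys (by simp at h; omega)]
      rfl

theorem pvZip_eq_W (N : Nat) (hN : 1 ≤ N) :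
    ∀ xs : List Int, pvZip ((List.range N).map (fun i => xs.drop i)) = pvW N xs := by
  intro xs
  induction xs with
  | nil =>
    obtain ⟨m, rfl⟩ : ∃ m, N = m + 1 := ⟨N - 1, by omega⟩
    rw [List.range_succ_eq_map]
    simp [pvZip, pvZipAux, pvW]
  | cons x t ih =>
    obtain ⟨m, hm⟩ : ∃ m, N = m + 1 := ⟨N - 1, by omega⟩
    subst hm
    rw [List.range_succ_eq_map]
    simp only [List.map_cons, List.map_map, List.drop_zero, pvZip]
    have hmap : (List.range m).map ((fun i => (x :: t).drop i) ∘ Nat.succ)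
        = (List.range m).map (fun i => t.drop i) := by
      apply List.map_congr_left; intro i _; rfl
    rw [hmap]
    by_cases hlen : m ≤ t.length
    · have hne : ∀ l ∈ (List.range m).map (fun i => t.drop i), l ≠ [] := by
        intro l hl
        simp only [List.mem_map, List.mem_range] at hl
        obtain ⟨i, hi, rfl⟩ := hl
        simp; omega
      simp only [pvZipAux, pvUncons_all _ hne]
      have htails : ((List.range m).map (fun i => t.drop i)).map List.tail
          = (List.range m).map (fun i => t.drop (i + 1)) := by
        rw [List.map_map]; apply List.map_congr_left; intro i _
        simp [List.tail_drop]
      have hheads : ((List.range m).map (fun i => t.drop i)).map (fun l => l.headD 0)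
          = t.take m := by rw [List.map_map]; exact pv_heads_take m t hlen
      rw [htails, hheads]
      have hrec : pvZipAux t ((List.range m).map (fun i => t.drop (i + 1)))
          = pvZip ((List.range (m + 1)).map (fun i => t.drop i)) := by
        rw [List.range_succ_eq_map]
        simp only [List.map_cons, List.map_map, List.drop_zero, pvZip]
        rfl
      rw [hrec, ih]
      simp only [pvW]
      rw [if_neg (by omega)]
      simp
    · have hmem : [] ∈ (List.range m).map (fun i => t.drop i) := by
        simp only [List.mem_map, List.mem_range]
        exact ⟨t.length, by omega, by simp⟩
      simp only [pvZipAux, pvUncons_none _ hmem]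
      rw [pvW_short (m + 1) (x :: t) (by simp; omega)]

-- B's port reduced to pvZip over plain drops
theorem pvAlt_eq (xs : List Int) (n : Int) (h : ¬ n > (xs.length : Int)) :
    window_4_alt xs n = pvZip ((List.range n.toNat).map (fun i => xs.drop i)) := by
  unfold window_4_alt
  rw [if_neg h]
  rw [PySem.List.pyRange_one]
  simp only [List.map_map, Int.sub_zero]
  congr 1
  apply List.map_congr_left
  intro i _
  simp only [Function.comp_apply, Int.zero_add]
  rw [PySem.List.slice_from_natCast]

-- ===== VERDICT (by name: the statement is the Claim_ definition above) =====
theorem window_4_spec : Claim_equal_window_4 := by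
  intro iterable n _
  unfold Spec_window_4
  have hL : (0 : Int) ≤ (iterable.length : Int) := by positivity
  rcases (by omega : n ≤ 0 ∨ 0 < n) with hn | hn
  · rw [pvAlt_eq iterable n (by omega)]
    have : n.toNat = 0 := by omega
    rw [this]
    simp only [List.range_zero, List.map_nil, pvZip]
    unfold window_4
    exact pvA_nonpos n hn iterable [] []
  · obtain ⟨N, hN1, hNc⟩ : ∃ N : Nat, 1 ≤ N ∧ n = (N : Int) :=
      ⟨n.toNat, by omega, by omega⟩
    subst hNc
    by_cases hbig : (N : Int) > (iterable.length : Int)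
    · unfold window_4_alt
      rw [if_pos hbig]
      unfold window_4
      rw [pvA_fill N hN1 iterable [] [] (by simpa using hN1)]
      simpa using pvW_short N iterable (by exact_mod_cast hbig)
    rw [pvAlt_eq iterable (N : Int) hbig]
    rw [Int.toNat_natCast]
    rw [pvZip_eq_W N hN1 iterable]
    unfold window_4
    rw [pvA_fill N hN1 iterable [] [] (by simpa using hN1)]
    simp
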